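-- pv_equiv track=rewrite | github.com/pgoudet-42/woody_woodpacker | test_fold/clean_objdump.py | add_c_words
-- ===== SOURCE A (Python) =====
-- def add_c_words(code, size: int):
--     code = code.split("\n")
--     tabs = " " * len("unsigned char code[] = {  ")
--     for i, c in enumerate(code):
--         if i == 0:
--             code[i] = "#include \"../include/woody.h\"\n\nunsigned char code[] = {  " + c + "\n"
--         else:
--             code[i] = tabs + c + "\n"
--     code[i] += " " * len("unsigned char code[] = {")  + "};\n"
--     code = "".join(code)
--     # code += "\n    *size = %d;\n    return (code);\n}\n" % size
--     return code
-- ===== SOURCE B (Python) =====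
-- def add_c_words(code, size: int):
--     header = "#include \"../include/woody.h\"\n\nunsigned char code[] = {  "
--     indent = " " * len("unsigned char code[] = {  ")
--     footer = " " * len("unsigned char code[] = {") + "};\n"
--     return header + code.replace("\n", "\n" + indent) + "\n" + footer
-- ===== Notes on version B (the rewrite author's own statement) =====
-- stated objective: simpler
-- what changed: Replaces A's split-into-lines / enumerate-loop / mutate-last-element / join pipeline with a single expression: header + code.replace('\n', '\n' + indent) + '\n' + footer.
import Mathlib
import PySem

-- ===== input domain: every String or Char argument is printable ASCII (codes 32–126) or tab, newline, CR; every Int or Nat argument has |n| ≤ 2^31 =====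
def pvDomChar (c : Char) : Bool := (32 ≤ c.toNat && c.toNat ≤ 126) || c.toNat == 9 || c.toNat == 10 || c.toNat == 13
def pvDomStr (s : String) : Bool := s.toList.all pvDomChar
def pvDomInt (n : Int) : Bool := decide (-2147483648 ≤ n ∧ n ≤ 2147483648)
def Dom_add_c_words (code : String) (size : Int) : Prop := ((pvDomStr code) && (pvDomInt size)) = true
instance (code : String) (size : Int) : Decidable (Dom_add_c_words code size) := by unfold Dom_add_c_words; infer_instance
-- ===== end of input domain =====

-- B replaces A's split/enumerate/mutate/join pipeline by one whole-string replace ("\n" -> "\n" + indent)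
-- between a header and a footer literal (objective: simpler; size is unused by both, as in A).

-- ===== PORT A =====
-- A, step for step: split on "\n"; prefix line 0 with the header and every later line with 26 spaces,
-- appending "\n" to each; append 24 spaces + "};\n" to the last element; join.
def add_c_words (code : String) (size : Int) : String :=
  let lines := PySem.Chars.splitOn code.toList ['\n']
  let tabs := List.replicate (PySem.Chars.len "unsigned char code[] = {  ".toList).toNat ' '
  let lines2 := (PySem.List.enumerate lines).map (fun ic =>
      if ic.1 == 0 then
        "#include \"../include/woody.h\"\n\nunsigned char code[] = {  ".toList ++ ic.2 ++ ['\n']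
      else tabs ++ ic.2 ++ ['\n'])
  -- code[i] += … with i = last index after the loop (splitOn never returns [])
  let lines3 := lines2.dropLast ++
      [lines2.getLastD [] ++ (List.replicate (PySem.Chars.len "unsigned char code[] = {".toList).toNat ' ' ++ "};\n".toList)]
  String.ofList (PySem.Chars.join [] lines3)

-- ===== PORT B =====
def add_c_words_alt (code : String) (size : Int) : String :=
  let header := "#include \"../include/woody.h\"\n\nunsigned char code[] = {  "
  let indent := List.replicate (PySem.Chars.len "unsigned char code[] = {  ".toList).toNat ' '
  let footer := List.replicate (PySem.Chars.len "unsigned char code[] = {".toList).toNat ' ' ++ "};\n".toList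
  String.ofList (header.toList ++ PySem.Chars.replace code.toList ['\n'] ('\n' :: indent) ++ '\n' :: footer)

-- ===== PRECONDITION & SPEC =====
def Spec_add_c_words (code : String) (size : Int) (out : String) : Prop := out = add_c_words_alt code size
instance (code : String) (size : Int) (out : String) : Decidable (Spec_add_c_words code size out) := by unfold Spec_add_c_words; infer_instance

-- ===== CLAIM (what is proved, stated in full; the proofs are below) =====
def Claim_equal_add_c_words : Prop := ∀ (code : String) (size : Int), Dom_add_c_words code size → Spec_add_c_words code size (add_c_words code size)

-- ===== LEMMAS AND PROOFS =====

/-- Structural model of `s.split("\n")`: (first piece, remaining pieces). -/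
def splitNL : List Char → List Char × List (List Char)
  | [] => ([], [])
  | c :: t =>
    let p := splitNL t
    if c = '\n' then ([], p.1 :: p.2) else (c :: p.1, p.2)

/-- Structural model of `s.replace("\n", new)`. -/
def replNL (new : List Char) : List Char → List Char
  | [] => []
  | c :: t => if c = '\n' then new ++ replNL new t else c :: replNL new t

lemma splitOn_go_eq (fuel : Nat) : ∀ (l cur : List Char) (acc : List (List Char)),
    l.length ≤ fuel →
    PySem.Chars.splitOn.go ['\n'] fuel l cur acc
      = acc.reverse ++ (cur.reverse ++ (splitNL l).1) :: (splitNL l).2 := by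
  induction fuel with
  | zero =>
    intro l cur acc h
    have : l = [] := List.length_eq_zero_iff.mp (Nat.le_zero.mp h)
    subst this
    simp [PySem.Chars.splitOn.go, splitNL]
  | succ n ih =>
    intro l cur acc h
    cases l with
    | nil => simp [PySem.Chars.splitOn.go, splitNL]
    | cons c t =>
      have hpre : List.isPrefixOf ['\n'] (c :: t) = (c == '\n') := by
        simp [List.isPrefixOf, Bool.beq_comm]
      by_cases hc : c = '\n'
      · subst hc
        rw [PySem.Chars.splitOn.go]
        simp only [hpre, beq_self_eq_true, if_true, List.length_cons, List.length_nil,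
          List.drop_succ_cons, List.drop_zero]
        rw [ih t [] (cur.reverse :: acc) (by simpa using Nat.le_of_succ_le_succ h)]
        simp [splitNL]
      · rw [PySem.Chars.splitOn.go]
        simp only [hpre, beq_iff_eq, hc, if_false]
        rw [ih t (c :: cur) acc (by simpa using Nat.le_of_succ_le_succ h)]
        simp [splitNL, hc]

lemma splitOn_eq (cs : List Char) :
    PySem.Chars.splitOn cs ['\n'] = (splitNL cs).1 :: (splitNL cs).2 := by
  rw [PySem.Chars.splitOn, splitOn_go_eq (cs.length + 1) cs [] [] (Nat.le_succ _)]
  simp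

lemma replace_go_eq (new : List Char) (fuel : Nat) : ∀ (l acc : List Char),
    l.length ≤ fuel →
    PySem.Chars.replace.go ['\n'] new fuel l acc = acc.reverse ++ replNL new l := by
  induction fuel with
  | zero =>
    intro l acc h
    have : l = [] := List.length_eq_zero_iff.mp (Nat.le_zero.mp h)
    subst this
    simp [PySem.Chars.replace.go, replNL]
  | succ n ih =>
    intro l acc h
    cases l with
    | nil => simp [PySem.Chars.replace.go, replNL]
    | cons c t =>
      have hpre : List.isPrefixOf ['\n'] (c :: t) = (c == '\n') := by
        simp [List.isPrefixOf, Bool.beq_comm]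
      by_cases hc : c = '\n'
      · subst hc
        rw [PySem.Chars.replace.go]
        simp only [hpre, beq_self_eq_true, if_true, List.length_cons, List.length_nil,
          List.drop_succ_cons, List.drop_zero]
        rw [ih t (new.reverse ++ acc) (by simpa using Nat.le_of_succ_le_succ h)]
        simp [replNL]
      · rw [PySem.Chars.replace.go]
        simp only [hpre, beq_iff_eq, hc, if_false]
        rw [ih t (c :: acc) (by simpa using Nat.le_of_succ_le_succ h)]
        simp [replNL, hc]

lemma replace_eq (cs new : List Char) :
    PySem.Chars.replace cs ['\n'] new = replNL new cs := by
  rw [PySem.Chars.replace]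
  simp only [List.isEmpty_cons]
  exact replace_go_eq new cs.length cs [] (Nat.le_refl _)

/-- replace = first piece ++ each later piece prefixed by the replacement. -/
lemma replNL_splitNL (new cs : List Char) :
    replNL new cs = (splitNL cs).1 ++ ((splitNL cs).2.map (fun p => new ++ p)).flatten := by
  induction cs with
  | nil => simp [replNL, splitNL]
  | cons c t ih =>
    by_cases hc : c = '\n'
    · subst hc; simp [replNL, splitNL, ih]
    · simp [replNL, splitNL, hc, ih]

lemma join_nil_flatten (l : List (List Char)) : PySem.Chars.join [] l = l.flatten := by
  simp [PySem.Chars.join, List.intercalate]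
  induction l with
  | nil => simp
  | cons a t ih => cases t <;> simp_all [List.intersperse]

lemma enumerate_map_pos (hd tb : List Char) (t : List (List Char)) :
    ∀ (n : Int), 0 < n →
    (PySem.List.enumerate t n).map
        (fun ic => if ic.1 == 0 then hd ++ ic.2 ++ ['\n'] else tb ++ ic.2 ++ ['\n'])
      = t.map (fun p => tb ++ p ++ ['\n']) := by
  induction t with
  | nil => intro n _; simp [PySem.List.enumerate]
  | cons a t ih =>
    intro n hn
    rw [PySem.List.enumerate]
    simp only [List.map_cons]
    rw [ih (n + 1) (by omega)]
    simp [show ¬ (n = 0) by omega]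

lemma flatten_dropLast_last (F : List Char) (l : List (List Char)) (hl : l ≠ []) :
    ∀ (d : List Char), (l.dropLast ++ [l.getLastD d ++ F]).flatten = l.flatten ++ F := by
  induction l with
  | nil => exact absurd rfl hl
  | cons a t ih =>
    intro d
    cases t with
    | nil => simp
    | cons b s =>
      rw [List.dropLast_cons₂, List.getLastD_cons, List.cons_append, List.flatten_cons,
        ih (by simp) a, List.flatten_cons, List.append_assoc]
      simp

/-- Re-associating the pieces: A's per-line "\n"-suffixed indents equal B's "\n"-prefixed ones. -/
lemma assemble (hd tabs F : List Char) (snd : List (List Char)) :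
    ∀ (fst : List Char),
    ((hd ++ fst ++ ['\n']) ++ (snd.map (fun p => tabs ++ p ++ ['\n'])).flatten) ++ F
      = (hd ++ (fst ++ ((snd.map (fun p => ('\n' :: tabs) ++ p)).flatten))) ++ '\n' :: F := by
  induction snd with
  | nil => intro fst; simp
  | cons p s ih =>
    intro fst
    have h := ih (fst ++ '\n' :: (tabs ++ p))
    simp only [List.map_cons, List.flatten_cons, List.append_assoc, List.cons_append] at h ⊢
    exact h

-- ===== VERDICT (by name: the statement is the Claim_ definition above) =====
theorem add_c_words_spec : Claim_equal_add_c_words := by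
  intro code size _
  unfold Spec_add_c_words add_c_words add_c_words_alt
  apply congrArg String.ofList
  rw [splitOn_eq, replace_eq, replNL_splitNL, join_nil_flatten]
  set fst := (splitNL code.toList).1
  set snd := (splitNL code.toList).2
  rw [show PySem.List.enumerate (fst :: snd) 0
        = (0, fst) :: PySem.List.enumerate snd (0 + 1) by rw [PySem.List.enumerate]]
  simp only [List.map_cons]
  rw [enumerate_map_pos _ _ snd (0 + 1) (by omega)]
  simp only [beq_self_eq_true, if_true]
  rw [flatten_dropLast_last _ _ (by simp), List.flatten_cons]
  have h := assemble "#include \"../include/woody.h\"\n\nunsigned char code[] = {  ".toList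
    (List.replicate (PySem.Chars.len "unsigned char code[] = {  ".toList).toNat ' ')
    (List.replicate (PySem.Chars.len "unsigned char code[] = {".toList).toNat ' ' ++ "};\n".toList)
    snd fst
  simp only [List.append_assoc, List.cons_append] at h ⊢
  exact h
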